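-- pv_equiv track=rewrite | github.com/root-aj000/DATASET_GEN | text_generator.py | _fix_colons
-- ===== SOURCE A (Python) =====
-- def _fix_colons(s):
--     result = []; in_str = False; in_val = False; after_c = False; esc = False
--     for c in s:
--         if esc: result.append(c); esc = False; continue
--         if c == '\\': result.append(c); esc = True; continue
--         if c == '"':
--             in_str = not in_str
--             if in_str and after_c: in_val = True; after_c = False
--             elif not in_str: in_val = False
--             result.append(c); continue
--         if not in_str and c == ':': after_c = True; result.append(c); continue
--         if not in_str: after_c = False
--         if in_val and c == ':': result.append(' -'); continue
--         result.append(c)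
--     return ''.join(result)
-- ===== SOURCE B (Python) =====
-- # B: tokenizer pass -- consume whole quoted string literals (and escape pairs) as
-- # tokens instead of a flat per-character boolean state machine; a string literal
-- # whose opening quote immediately follows a colon token is a value and has its
-- # unescaped colons rewritten to ' -'.
--
-- def _scan_string(s, i):
--     # s[i] is the opening quote; return the index just past the literal
--     j = i + 1
--     while j < len(s):
--         if s[j] == '"':
--             return j + 1
--         if s[j] == '\\':
--             if j + 1 < len(s):
--                 j += 2
--             else:
--                 return j  # lone trailing backslash stays outside the literal
--         else:
--             j += 1
--     return j
--
-- def _replace_colons(tok):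
--     out = []
--     k = 0
--     while k < len(tok):
--         c = tok[k]
--         if c == '\\' and k + 1 < len(tok):
--             out.append(tok[k:k+2]); k += 2
--         elif c == ':':
--             out.append(' -'); k += 1
--         else:
--             out.append(c); k += 1
--     return ''.join(out)
--
-- def _fix_colons(s):
--     out = []
--     value_next = False
--     i = 0
--     n = len(s)
--     while i < n:
--         c = s[i]
--         if c == '"':
--             j = _scan_string(s, i)
--             tok = s[i:j]
--             out.append(_replace_colons(tok) if value_next else tok)
--             value_next = False
--             i = j
--         elif c == '\\':
--             out.append(s[i:i+2])  # escape pair keeps value_next unchanged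
--             i += 2
--         elif c == ':':
--             out.append(c)
--             value_next = True
--             i += 1
--         else:
--             out.append(c)
--             value_next = False
--             i += 1
--     return ''.join(out)
-- ===== Notes on version B (the rewrite author's own statement) =====
-- stated objective: alternative
-- what changed: Replaced A's flat per-character state machine with four booleans by a two-level tokenizer that consumes whole quoted string literals and escape pairs as tokens and rewrites colons inside a value literal in a dedicated helper.
import Mathlib
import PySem

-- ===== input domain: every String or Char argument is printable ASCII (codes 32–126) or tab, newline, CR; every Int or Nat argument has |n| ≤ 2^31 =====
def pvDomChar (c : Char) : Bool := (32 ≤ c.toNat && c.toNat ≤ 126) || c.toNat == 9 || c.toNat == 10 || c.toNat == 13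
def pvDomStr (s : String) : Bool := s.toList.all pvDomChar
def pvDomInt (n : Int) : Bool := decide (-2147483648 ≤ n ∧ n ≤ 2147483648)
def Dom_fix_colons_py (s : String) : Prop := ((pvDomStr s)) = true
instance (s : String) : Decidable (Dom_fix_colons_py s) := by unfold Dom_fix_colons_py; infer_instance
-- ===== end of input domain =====

-- B rewrites A's flat per-character boolean state machine as a tokenizer that consumes
-- whole quoted string literals (and escape pairs) at once; same return value, alternative structure.

-- ===== PORT A =====
-- literal transliteration of A's loop: structural recursion carrying the four booleans
-- (in_str, in_val, after_c, esc); `result.append` becomes consing onto the output.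
def pvGoA : List Char → Bool → Bool → Bool → Bool → List Char
  | [], _, _, _, _ => []
  | c :: rest, in_str, in_val, after_c, esc =>
    if esc then c :: pvGoA rest in_str in_val after_c false
    else if c = '\\' then c :: pvGoA rest in_str in_val after_c true
    else if c = '"' then
      let in_str' := !in_str
      let p : Bool × Bool :=
        if in_str' && after_c then (true, false)
        else if !in_str' then (false, after_c)
        else (in_val, after_c)
      c :: pvGoA rest in_str' p.1 p.2 false
    else if (!in_str) && (c == ':') then c :: pvGoA rest in_str in_val true false
    else
      let after_c' := if !in_str then false else after_c
      if in_val && (c == ':') then ' ' :: '-' :: pvGoA rest in_str in_val after_c' false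
      else c :: pvGoA rest in_str in_val after_c' false

def fix_colons_py (s : String) : String :=
  String.ofList (pvGoA s.toList false false false false)

-- ===== PORT B =====
-- _scan_string: given the chars after an opening quote, return (literal body incl.
-- closing quote, remaining chars); a lone trailing backslash stays outside the literal.
def pvScanStr : List Char → List Char × List Char
  | [] => ([], [])
  | c :: r =>
    if c = '"' then (['"'], r)
    else if c = '\\' then
      match r with
      | [] => ([], ['\\'])
      | c2 :: r2 => let p := pvScanStr r2; ('\\' :: c2 :: p.1, p.2)
    else let p := pvScanStr r; (c :: p.1, p.2)

-- termination measure for pvGoB's string-literal step (cited in its decreasing_by)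
lemma pvScanStr_len : ∀ (n : Nat) (cs : List Char), cs.length ≤ n →
    (pvScanStr cs).2.length ≤ cs.length := by
  intro n
  induction n with
  | zero =>
    intro cs h
    have : cs = [] := by cases cs <;> simp_all
    subst this; rw [pvScanStr.eq_def]
  | succ n ih =>
    intro cs h
    match cs with
    | [] => rw [pvScanStr.eq_def]
    | c :: r =>
      rw [pvScanStr.eq_def]
      by_cases hq : c = '"'
      · simp [hq]
      · by_cases hb : c = '\\'
        · match r with
          | [] => simp [hb]
          | c2 :: r2 =>
            have h2 := ih r2 (by simp at h ⊢; omega)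
            simp [hb]; omega
        · have h2 := ih r (by simp at h; omega)
          simp [hq, hb]; omega

-- _replace_colons: rewrite unescaped ':' to ' -' inside one token
def pvReplStr : List Char → List Char
  | [] => []
  | c :: r =>
    if c = '\\' then
      match r with
      | [] => ['\\']
      | c2 :: r2 => '\\' :: c2 :: pvReplStr r2
    else if c = ':' then ' ' :: '-' :: pvReplStr r
    else c :: pvReplStr r

-- B's main loop: dispatch on the current character, consuming a whole string
-- literal (via pvScanStr) or an escape pair per step; vn = value_next.
def pvGoB : List Char → Bool → List Char
  | [], _ => []
  | c :: r, vn =>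
    if c = '"' then
      let p := pvScanStr r
      (if vn then pvReplStr ('"' :: p.1) else '"' :: p.1) ++ pvGoB p.2 false
    else if c = '\\' then
      match r with
      | [] => ['\\']
      | c2 :: r2 => '\\' :: c2 :: pvGoB r2 vn
    else if c = ':' then ':' :: pvGoB r true
    else c :: pvGoB r false
termination_by cs _ => cs.length
decreasing_by
  · have := pvScanStr_len r.length r le_rfl; simp; omega
  · simp
  · simp
  · simp

def fix_colons_py_alt (s : String) : String :=
  String.ofList (pvGoB s.toList false)

-- ===== PRECONDITION & SPEC =====
def Spec_fix_colons_py (s : String) (out : String) : Prop := out = fix_colons_py_alt s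
instance (s : String) (out : String) : Decidable (Spec_fix_colons_py s out) := by unfold Spec_fix_colons_py; infer_instance

-- ===== CLAIM (what is proved, stated in full; the proofs are below) =====
def Claim_equal_fix_colons_py : Prop := ∀ (s : String), Dom_fix_colons_py s → Spec_fix_colons_py s (fix_colons_py s)

-- ===== LEMMAS AND PROOFS =====

-- one-step unfolding lemmas for the four recursions (the `.eq_def` equations
-- specialised to each branch, so proofs can rewrite without looping)

lemma pvGoA_nil (a b c d : Bool) : pvGoA [] a b c d = [] := by
  rw [pvGoA.eq_def]

lemma pvGoA_esc (c : Char) (r : List Char) (a b ac : Bool) :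
    pvGoA (c :: r) a b ac true = c :: pvGoA r a b ac false := by
  rw [pvGoA.eq_def]; simp

lemma pvGoA_bslash (r : List Char) (a b ac : Bool) :
    pvGoA ('\\' :: r) a b ac false = '\\' :: pvGoA r a b ac true := by
  rw [pvGoA.eq_def]; simp

lemma pvGoA_quote_open (r : List Char) (ac : Bool) :
    pvGoA ('"' :: r) false false ac false = '"' :: pvGoA r true ac false false := by
  rw [pvGoA.eq_def]; cases ac <;> simp

lemma pvGoA_quote_close (r : List Char) (v : Bool) :
    pvGoA ('"' :: r) true v false false = '"' :: pvGoA r false false false false := by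
  rw [pvGoA.eq_def]; simp

lemma pvGoA_colon_out (r : List Char) (ac : Bool) :
    pvGoA (':' :: r) false false ac false = ':' :: pvGoA r false false true false := by
  rw [pvGoA.eq_def]; simp

lemma pvGoA_other_out (c : Char) (r : List Char) (ac : Bool)
    (hb : c ≠ '\\') (hq : c ≠ '"') (hc : c ≠ ':') :
    pvGoA (c :: r) false false ac false = c :: pvGoA r false false false false := by
  rw [pvGoA.eq_def]; simp [hb, hq, hc]

lemma pvGoA_colon_in (r : List Char) (v : Bool) :
    pvGoA (':' :: r) true v false false =
      (if v then [' ', '-'] else [':']) ++ pvGoA r true v false false := by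
  rw [pvGoA.eq_def]; cases v <;> simp

lemma pvGoA_other_in (c : Char) (r : List Char) (v : Bool)
    (hb : c ≠ '\\') (hq : c ≠ '"') (hc : c ≠ ':') :
    pvGoA (c :: r) true v false false = c :: pvGoA r true v false false := by
  rw [pvGoA.eq_def]; simp [hb, hq, hc]

lemma pvScanStr_nil : pvScanStr [] = ([], []) := by rw [pvScanStr.eq_def]

lemma pvScanStr_quote (r : List Char) : pvScanStr ('"' :: r) = (['"'], r) := by
  rw [pvScanStr.eq_def]; simp

lemma pvScanStr_esc_nil : pvScanStr ['\\'] = ([], ['\\']) := by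
  rw [pvScanStr.eq_def]; simp

lemma pvScanStr_esc (c2 : Char) (r2 : List Char) :
    pvScanStr ('\\' :: c2 :: r2) =
      ('\\' :: c2 :: (pvScanStr r2).1, (pvScanStr r2).2) := by
  rw [pvScanStr.eq_def]; simp

lemma pvScanStr_other (c : Char) (r : List Char) (hq : c ≠ '"') (hb : c ≠ '\\') :
    pvScanStr (c :: r) = (c :: (pvScanStr r).1, (pvScanStr r).2) := by
  rw [pvScanStr.eq_def]; simp [hq, hb]

lemma pvReplStr_nil : pvReplStr [] = [] := by rw [pvReplStr.eq_def]

lemma pvReplStr_esc (c2 : Char) (r2 : List Char) :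
    pvReplStr ('\\' :: c2 :: r2) = '\\' :: c2 :: pvReplStr r2 := by
  rw [pvReplStr.eq_def]; simp

lemma pvReplStr_colon (r : List Char) : pvReplStr (':' :: r) = ' ' :: '-' :: pvReplStr r := by
  rw [pvReplStr.eq_def]; simp

lemma pvReplStr_other (c : Char) (r : List Char) (hb : c ≠ '\\') (hc : c ≠ ':') :
    pvReplStr (c :: r) = c :: pvReplStr r := by
  rw [pvReplStr.eq_def]; simp [hb, hc]

lemma pvGoB_nil (vn : Bool) : pvGoB [] vn = [] := by rw [pvGoB.eq_def]

lemma pvGoB_quote (r : List Char) (vn : Bool) :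
    pvGoB ('"' :: r) vn =
      (if vn then pvReplStr ('"' :: (pvScanStr r).1) else '"' :: (pvScanStr r).1)
        ++ pvGoB (pvScanStr r).2 false := by
  rw [pvGoB.eq_def]; simp

lemma pvGoB_esc_nil (vn : Bool) : pvGoB ['\\'] vn = ['\\'] := by
  rw [pvGoB.eq_def]; simp

lemma pvGoB_esc (c2 : Char) (r2 : List Char) (vn : Bool) :
    pvGoB ('\\' :: c2 :: r2) vn = '\\' :: c2 :: pvGoB r2 vn := by
  rw [pvGoB.eq_def]; simp

lemma pvGoB_colon (r : List Char) (vn : Bool) :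
    pvGoB (':' :: r) vn = ':' :: pvGoB r true := by
  rw [pvGoB.eq_def]; simp

lemma pvGoB_other (c : Char) (r : List Char) (vn : Bool)
    (hq : c ≠ '"') (hb : c ≠ '\\') (hc : c ≠ ':') :
    pvGoB (c :: r) vn = c :: pvGoB r false := by
  rw [pvGoB.eq_def]; simp [hq, hb, hc]

-- Inside a string literal, A's state machine emits exactly the (possibly
-- colon-rewritten) literal body, then resumes in the base state on the rest.
lemma pvGoA_inStr : ∀ (n : Nat) (rest : List Char), rest.length ≤ n → ∀ v : Bool,
    pvGoA rest true v false false =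
      (if v then pvReplStr (pvScanStr rest).1 else (pvScanStr rest).1)
        ++ pvGoA (pvScanStr rest).2 false false false false := by
  intro n
  induction n with
  | zero =>
    intro rest h v
    have : rest = [] := by cases rest <;> simp_all
    subst this
    cases v <;> simp [pvScanStr_nil, pvReplStr_nil, pvGoA_nil]
  | succ n ih =>
    intro rest h v
    match rest with
    | [] => cases v <;> simp [pvScanStr_nil, pvReplStr_nil, pvGoA_nil]
    | c :: r =>
      by_cases hq : c = '"'
      · subst hq
        rw [pvGoA_quote_close, pvScanStr_quote]
        cases v <;> simp [pvReplStr_other, pvReplStr_nil]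
      · by_cases hb : c = '\\'
        · subst hb
          match r with
          | [] =>
            cases v <;>
              simp [pvGoA_bslash, pvGoA_nil, pvScanStr_esc_nil, pvReplStr_nil]
          | c2 :: r2 =>
            rw [pvGoA_bslash, pvGoA_esc, pvScanStr_esc,
                ih r2 (by simp at h; omega) v]
            cases v <;> simp [pvReplStr_esc]
        · by_cases hc : c = ':'
          · subst hc
            rw [pvGoA_colon_in, pvScanStr_other ':' r hq hb,
                ih r (by simp at h; omega) v]
            cases v <;> simp [pvReplStr_colon]
          · rw [pvGoA_other_in c r v hb hq hc, pvScanStr_other c r hq hb,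
                ih r (by simp at h; omega) v]
            cases v <;> simp [pvReplStr_other c _ hb hc]

-- Main invariant: at a token boundary A's state is (in_str=false, in_val=false,
-- after_c=ac, esc=false) and agrees with B's loop with value_next = ac.
lemma pvMain : ∀ (n : Nat) (cs : List Char), cs.length ≤ n → ∀ ac : Bool,
    pvGoA cs false false ac false = pvGoB cs ac := by
  intro n
  induction n with
  | zero =>
    intro cs h ac
    have : cs = [] := by cases cs <;> simp_all
    subst this; simp [pvGoA_nil, pvGoB_nil]
  | succ n ih =>
    intro cs h ac
    match cs with
    | [] => simp [pvGoA_nil, pvGoB_nil]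
    | c :: r =>
      by_cases hq : c = '"'
      · subst hq
        have hlen : (pvScanStr r).2.length ≤ n := by
          have := pvScanStr_len r.length r le_rfl
          simp at h; omega
        rw [pvGoA_quote_open, pvGoB_quote,
            pvGoA_inStr r.length r le_rfl ac, ih (pvScanStr r).2 hlen false]
        cases ac <;> simp [pvReplStr_other '"' _ (by decide) (by decide)]
      · by_cases hb : c = '\\'
        · subst hb
          match r with
          | [] =>
            rw [pvGoA_bslash, pvGoB_esc_nil, pvGoA_nil]
          | c2 :: r2 =>
            rw [pvGoA_bslash, pvGoA_esc, pvGoB_esc,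
                ih r2 (by simp at h; omega) ac]
        · by_cases hc : c = ':'
          · subst hc
            rw [pvGoA_colon_out, pvGoB_colon, ih r (by simp at h; omega) true]
          · rw [pvGoA_other_out c r ac hb hq hc, pvGoB_other c r ac hq hb hc,
                ih r (by simp at h; omega) false]

-- ===== VERDICT (by name: the statement is the Claim_ definition above) =====
theorem fix_colons_py_spec : Claim_equal_fix_colons_py := by
  intro s _
  unfold Spec_fix_colons_py fix_colons_py fix_colons_py_alt
  rw [pvMain s.toList.length s.toList le_rfl false]
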